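-- pv_equiv track=rewrite | github.com/kaxm23/translation-service | app/api/translation_suggestions.py | _parse_implementation_steps
-- ===== SOURCE A (Python) =====
-- from typing import List, Dict, Optional
--
-- def _parse_implementation_steps(implementation: str) -> List[str]:
--     """Parse implementation steps from suggestion."""
--     steps = []
--     current_step = []
--
--     for line in implementation.split('\n'):
--         line = line.strip()
--         if line:
--             if line.startswith(('1.', '2.', '3.', '4.', '5.', '-', '*')):
--                 if current_step:
--                     steps.append(' '.join(current_step))
--                 current_step = [line.lstrip('123456789.-* ')]
--             else:
--                 current_step.append(line)
--
--     if current_step: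
--         steps.append(' '.join(current_step))
--
--     return steps or ["Implementation details not provided"]
-- ===== SOURCE B (Python) =====
-- from typing import List
--
-- _MARKS = ('1.', '2.', '3.', '4.', '5.', '-', '*')
--
--
-- def _parse_implementation_steps(implementation: str) -> List[str]:
--     """Parse implementation steps from suggestion."""
--     lines = [s for s in (l.strip() for l in implementation.split('\n')) if s]
--
--     def segments(ls: List[str]) -> List[str]:
--         if not ls:
--             return []
--         first = ls[0].lstrip('123456789.-* ') if ls[0].startswith(_MARKS) else ls[0]
--         body, rest = [], []
--         for k in range(1, len(ls)):
--             if ls[k].startswith(_MARKS):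
--                 rest = ls[k:]
--                 break
--             body.append(ls[k])
--         return [' '.join([first] + body)] + segments(rest)
--
--     return segments(lines) or ["Implementation details not provided"]
-- ===== Notes on version B (the rewrite author's own statement) =====
-- stated objective: alternative
-- what changed: Replaces A's single-pass accumulator (steps list plus a current_step buffer flushed at each marker line) with a two-phase approach: filter the stripped non-empty lines once, then a top-down recursion that splits that list at each marker boundary and joins one segment per split.
import Mathlib
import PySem

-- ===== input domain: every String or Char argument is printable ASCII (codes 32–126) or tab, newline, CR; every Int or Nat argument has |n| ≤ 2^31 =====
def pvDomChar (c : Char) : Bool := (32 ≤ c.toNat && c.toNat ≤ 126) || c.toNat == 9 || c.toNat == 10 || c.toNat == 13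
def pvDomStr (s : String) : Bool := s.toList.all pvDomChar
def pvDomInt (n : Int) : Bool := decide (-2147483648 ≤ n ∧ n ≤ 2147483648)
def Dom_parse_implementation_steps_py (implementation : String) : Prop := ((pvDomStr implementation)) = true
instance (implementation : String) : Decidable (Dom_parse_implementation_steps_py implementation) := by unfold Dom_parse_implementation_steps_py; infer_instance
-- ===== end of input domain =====

-- B replaces A's accumulator loop (steps + current_step buffer flushed at markers) by a
-- top-down recursion that splits the filtered line list at each marker boundary (objective: alternative).

-- shared helpers (both Pythons use the identical expressions)
-- implementation.split('\n') (sep nonempty, so split? is always some)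
def pvSplitNL (s : String) : List String := (PySem.Str.split? s "\n").getD []

-- line.startswith(('1.','2.','3.','4.','5.','-','*'))
def pvIsMark (s : String) : Bool :=
  PySem.Str.startswith s "1." || PySem.Str.startswith s "2." || PySem.Str.startswith s "3." ||
  PySem.Str.startswith s "4." || PySem.Str.startswith s "5." ||
  PySem.Str.startswith s "-" || PySem.Str.startswith s "*"

-- line.lstrip('123456789.-* ') — hand port (PySem has no left-only char-set strip):
-- drop leading chars of the set; exact for Python's str.lstrip(chars).
def pvLstripMarks (s : String) : String :=
  String.ofList (s.toList.dropWhile (fun c => c ∈ ['1','2','3','4','5','6','7','8','9','.','-','*',' ']))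

-- ===== PORT A =====
-- the for-loop, state (steps, current_step)
def pvLoopA : List String → List String → List String → List String × List String
  | [], steps, cur => (steps, cur)
  | l :: rest, steps, cur =>
    let line := PySem.Str.strip l
    if line = "" then pvLoopA rest steps cur
    else if pvIsMark line then
      pvLoopA rest (if cur ≠ [] then steps ++ [PySem.Str.join " " cur] else steps) [pvLstripMarks line]
    else pvLoopA rest steps (cur ++ [line])

def parse_implementation_steps_py (implementation : String) : List String :=
  let (steps, cur) := pvLoopA (pvSplitNL implementation) [] []
  let steps := if cur ≠ [] then steps ++ [PySem.Str.join " " cur] else steps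
  if steps = [] then ["Implementation details not provided"] else steps

-- ===== PORT B =====
-- segments(ls): first segment = lines up to (excluding) the next marker, recurse on the rest
def pvSegsB (ls : List String) : List String :=
  match ls with
  | [] => []
  | l :: rest =>
    let first := if pvIsMark l then pvLstripMarks l else l
    let body := rest.takeWhile (fun s => !pvIsMark s)
    let rest' := rest.dropWhile (fun s => !pvIsMark s)
    PySem.Str.join " " (first :: body) :: pvSegsB rest'
termination_by ls.length
decreasing_by
  simpa using Nat.lt_succ_of_le (List.length_dropWhile_le (fun s => !pvIsMark s) rest)

def parse_implementation_steps_py_alt (implementation : String) : List String :=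
  let lines := ((pvSplitNL implementation).map PySem.Str.strip).filter (· ≠ "")
  let segs := pvSegsB lines
  if segs = [] then ["Implementation details not provided"] else segs

-- ===== PRECONDITION & SPEC =====
def Spec_parse_implementation_steps_py (implementation : String) (out : List String) : Prop := out = parse_implementation_steps_py_alt implementation
instance (implementation : String) (out : List String) : Decidable (Spec_parse_implementation_steps_py implementation out) := by unfold Spec_parse_implementation_steps_py; infer_instance

-- ===== CLAIM (what is proved, stated in full; the proofs are below) =====
def Claim_equal_parse_implementation_steps_py : Prop := ∀ (implementation : String), Dom_parse_implementation_steps_py implementation → Spec_parse_implementation_steps_py implementation (parse_implementation_steps_py implementation)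

-- ===== LEMMAS AND PROOFS =====

-- loop on already-stripped nonempty lines
def pvLoopF : List String → List String → List String → List String × List String
  | [], steps, cur => (steps, cur)
  | l :: rest, steps, cur =>
    if pvIsMark l then
      pvLoopF rest (if cur ≠ [] then steps ++ [PySem.Str.join " " cur] else steps) [pvLstripMarks l]
    else pvLoopF rest steps (cur ++ [l])

def pvFinish (st : List String × List String) : List String :=
  if st.2 ≠ [] then st.1 ++ [PySem.Str.join " " st.2] else st.1

theorem pvLoopA_eq_loopF (raw : List String) : ∀ steps cur,
    pvLoopA raw steps cur = pvLoopF ((raw.map PySem.Str.strip).filter (· ≠ "")) steps cur := by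
  induction raw with
  | nil => intro steps cur; simp [pvLoopA, pvLoopF]
  | cons l rest ih =>
    intro steps cur
    by_cases h : PySem.Str.strip l = ""
    · simp [pvLoopA, h, ih]
    · by_cases hm : pvIsMark (PySem.Str.strip l) <;>
        simp [pvLoopA, h, hm, ih, pvLoopF]

theorem pvSegsB_cons (l : String) (rest : List String) :
    pvSegsB (l :: rest) =
      PySem.Str.join " " ((if pvIsMark l then pvLstripMarks l else l) :: rest.takeWhile (fun s => !pvIsMark s))
        :: pvSegsB (rest.dropWhile (fun s => !pvIsMark s)) := by
  conv_lhs => rw [pvSegsB]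

theorem pvLoopF_flush (lines : List String) : ∀ steps cur, cur ≠ [] →
    pvFinish (pvLoopF lines steps cur) =
      steps ++ [PySem.Str.join " " (cur ++ lines.takeWhile (fun s => !pvIsMark s))]
            ++ pvSegsB (lines.dropWhile (fun s => !pvIsMark s)) := by
  induction lines with
  | nil => intro steps cur hc; simp [pvLoopF, pvFinish, hc, pvSegsB]
  | cons l rest ih =>
    intro steps cur hc
    by_cases hm : pvIsMark l
    · rw [pvLoopF]
      simp only [hm, hc, ne_eq, not_false_eq_true, if_true]
      rw [ih _ [pvLstripMarks l] (by simp)]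
      simp [hm, pvSegsB_cons]
    · rw [pvLoopF]
      simp only [hm, Bool.false_eq_true, if_false]
      rw [ih _ (cur ++ [l]) (by simp)]
      simp [hm, List.append_assoc]

theorem pvLoopF_nil_cur (lines : List String) (steps : List String) :
    pvFinish (pvLoopF lines steps []) = steps ++ pvSegsB lines := by
  cases lines with
  | nil => simp [pvLoopF, pvFinish, pvSegsB]
  | cons l rest =>
    by_cases hm : pvIsMark l
    · rw [pvLoopF]
      simp only [hm, ne_eq, not_true_eq_false, if_true]
      rw [pvLoopF_flush _ _ [pvLstripMarks l] (by simp), pvSegsB_cons]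
      simp [hm]
    · rw [pvLoopF]
      simp only [hm, Bool.false_eq_true, if_false]
      rw [List.nil_append, pvLoopF_flush _ _ [l] (by simp), pvSegsB_cons]
      simp [hm]

-- ===== VERDICT (by name: the statement is the Claim_ definition above) =====
theorem parse_implementation_steps_py_spec : Claim_equal_parse_implementation_steps_py := by
  intro implementation _
  unfold Spec_parse_implementation_steps_py parse_implementation_steps_py parse_implementation_steps_py_alt
  rw [pvLoopA_eq_loopF]
  have h := pvLoopF_nil_cur ((pvSplitNL implementation).map PySem.Str.strip |>.filter (· ≠ "")) []
  rw [List.nil_append] at h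
  unfold pvFinish at h
  simp only [ne_eq, decide_not, ite_not] at h ⊢
  rw [h]
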